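-- pv_equiv track=rewrite | github.com/Tulpana/ARC-AGI-2 | arc_agi_2_submission/ril/color_extraction.py | get_median_color
-- ===== SOURCE A (Python) =====
-- from typing import List, Dict, Tuple, Optional
--
-- Grid = List[List[int]]
--
-- def get_median_color(grid: Grid, ignore_background: bool = True) -> int:
--     """
--     Get the median color value in grid.
--
--     Args:
--         grid: Input grid
--         ignore_background: If True, ignore color 0
--
--     Returns:
--         Median color value
--     """
--     if not grid or not grid[0]:
--         return 0
--
--     colors = []
--     for row in grid:
--         colors.extend(row)
--
--     if ignore_background:
--         colors = [c for c in colors if c != 0]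
--
--     if not colors:
--         return 0
--
--     colors.sort()
--     mid = len(colors) // 2
--     return colors[mid]
-- ===== SOURCE B (Python) =====
-- def get_median_color(grid, ignore_background=True):
--     if not grid or not grid[0]:
--         return 0
--     colors = [c for row in grid for c in row if not (ignore_background and c == 0)]
--     if not colors:
--         return 0
--     counts = {}
--     for c in colors:
--         counts[c] = counts.get(c, 0) + 1
--     mid = len(colors) // 2
--     cum = 0
--     for k in sorted(counts):
--         cum += counts[k]
--         if cum > mid:
--             return k
--     return 0
-- ===== Notes on version B (the rewrite author's own statement) =====
-- stated objective: alternative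
-- what changed: Instead of sorting the whole flattened color list and indexing its middle, B builds a count dictionary in one pass and locates the median by a cumulative scan over the sorted distinct colors.
import Mathlib
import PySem

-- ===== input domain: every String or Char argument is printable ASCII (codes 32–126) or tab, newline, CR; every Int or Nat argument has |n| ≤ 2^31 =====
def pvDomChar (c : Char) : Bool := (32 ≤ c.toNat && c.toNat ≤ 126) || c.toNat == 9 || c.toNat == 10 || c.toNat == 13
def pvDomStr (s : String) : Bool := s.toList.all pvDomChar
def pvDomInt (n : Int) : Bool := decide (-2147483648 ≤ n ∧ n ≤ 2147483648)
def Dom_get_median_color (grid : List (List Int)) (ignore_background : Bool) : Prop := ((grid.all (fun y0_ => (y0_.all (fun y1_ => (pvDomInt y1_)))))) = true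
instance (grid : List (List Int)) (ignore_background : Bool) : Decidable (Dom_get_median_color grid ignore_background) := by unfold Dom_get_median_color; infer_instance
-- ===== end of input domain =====

-- B replaces A's full sort of the flattened color list by a one-pass count dictionary
-- plus a cumulative scan over the sorted distinct colors (fewer elements to sort).

-- ===== PORT A =====
def get_median_color (grid : List (List Int)) (ignore_background : Bool) : Int :=
  match grid with
  | [] => 0
  | r0 :: _ =>
    if r0 = [] then 0
    else
      let colors := grid.foldl (fun acc row => acc ++ row) []
      let colors := if ignore_background then colors.filter (fun c => !(c == 0)) else colors
      if colors = [] then 0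
      else
        let mid := PySem.Int.floordiv (colors.length : Int) 2
        -- colors.sort(); return colors[mid] — mid is always in range here, so getD 0 is never used
        (PySem.List.pyGet? (PySem.List.sorted colors (fun c => c) false) mid).getD 0

-- ===== PORT B =====
-- the loop 'cum += counts[k]; if cum > mid: return k' (early return = returning k)
def bScan (counts : PySem.Dict Int Int) (mid : Int) : List Int → Int → Int
  | [], _ => 0
  | k :: ks, cum =>
    let cum' := cum + counts.getD k 0
    if mid < cum' then k else bScan counts mid ks cum'

def get_median_color_alt (grid : List (List Int)) (ignore_background : Bool) : Int :=
  match grid with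
  | [] => 0
  | r0 :: _ =>
    if r0 = [] then 0
    else
      let colors := grid.flatMap (fun row => row.filter (fun c => !(ignore_background && c == 0)))
      if colors = [] then 0
      else
        let counts := colors.foldl (fun d c => d.insert c (d.getD c 0 + 1)) PySem.Dict.empty
        let mid := PySem.Int.floordiv (colors.length : Int) 2
        bScan counts mid (PySem.List.sorted counts.keys (fun k => k) false) 0

-- ===== PRECONDITION & SPEC =====
def Spec_get_median_color (grid : List (List Int)) (ignore_background : Bool) (out : Int) : Prop := out = get_median_color_alt grid ignore_background
instance (grid : List (List Int)) (ignore_background : Bool) (out : Int) : Decidable (Spec_get_median_color grid ignore_background out) := by unfold Spec_get_median_color; infer_instance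

-- ===== CLAIM (what is proved, stated in full; the proofs are below) =====
def Claim_equal_get_median_color : Prop := ∀ (grid : List (List Int)) (ignore_background : Bool), Dom_get_median_color grid ignore_background → Spec_get_median_color grid ignore_background (get_median_color grid ignore_background)

-- ===== LEMMAS AND PROOFS =====

-- A's flattening loop is List.flatten
theorem foldl_append_flatten (g : List (List Int)) (acc : List Int) :
    g.foldl (fun acc row => acc ++ row) acc = acc ++ g.flatten := by
  induction g generalizing acc with
  | nil => simp
  | cons r g ih => simp [List.foldl, ih, List.append_assoc]

-- a sorted list with k as a lower bound starts with its k's, grouped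
theorem sorted_run (s : List Int) (k : Int) (hs : s.Pairwise (· ≤ ·)) (hlb : ∀ x ∈ s, k ≤ x) :
    s.take (s.count k) = List.replicate (s.count k) k ∧ k ∉ s.drop (s.count k) := by
  induction s with
  | nil => simp
  | cons a t ih =>
    rcases List.pairwise_cons.mp hs with ⟨hat, ht⟩
    by_cases hak : a = k
    · subst hak
      have hcount : (a :: t).count a = t.count a + 1 := by simp
      have := ih ht (fun x hx => hlb x (by simp [hx]))
      rw [hcount]
      refine ⟨?_, by simpa [List.drop_succ_cons] using this.2⟩
      rw [List.take_succ_cons, this.1, List.replicate_succ]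
    · have hka : k < a := lt_of_le_of_ne (hlb a (by simp)) (fun h => hak h.symm)
      have hknot : k ∉ a :: t := by
        intro hk
        rcases List.mem_cons.mp hk with h | h
        · exact hak h.symm
        · exact absurd (hat k h) (not_le.mpr hka)
      have hc0 : (a :: t).count k = 0 := List.count_eq_zero.mpr hknot
      simp [hc0, hknot]

-- the cumulative scan over the strictly sorted distinct values of a sorted list s
-- returns s[m]; cum carries the number of elements already passed (mid = m + cum)
theorem bScan_spec (ks : List Int) : ∀ (s : List Int) (m : Nat) (cum : Int) (d : PySem.Dict Int Int),
    s.Pairwise (· ≤ ·) →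
    ks.Pairwise (· < ·) →
    (∀ k, k ∈ ks ↔ k ∈ s) →
    (∀ k ∈ ks, d.getD k 0 = (s.count k : Int)) →
    m < s.length →
    bScan d ((m : Int) + cum) ks cum = s.getD m 0 := by
  induction ks with
  | nil =>
    intro s m cum d _ _ hmem _ hm
    have : s = [] := List.eq_nil_iff_forall_not_mem.mpr (fun x hx => by simpa using (hmem x).mpr hx)
    subst this; simp at hm
  | cons k ks ih =>
    intro s m cum d hs hks hmem hcount hm
    have hkmem : k ∈ s := (hmem k).mp (by simp)
    have hlb : ∀ x ∈ s, k ≤ x := by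
      intro x hx
      have hxks : x ∈ k :: ks := (hmem x).mpr hx
      rcases List.mem_cons.mp hxks with h | h
      · exact le_of_eq h.symm
      · exact le_of_lt ((List.pairwise_cons.mp hks).1 x h)
    obtain ⟨htake, hdrop⟩ := sorted_run s k hs hlb
    have hc : d.getD k 0 = (s.count k : Int) := hcount k (by simp)
    have hclen : s.count k ≤ s.length := List.count_le_length
    have hcpos : 0 < s.count k := List.count_pos_iff.mpr hkmem
    simp only [bScan, hc]
    by_cases hmc : m < s.count k
    · rw [if_pos (by omega)]
      have h1 : s[m]? = (s.take (s.count k))[m]? := (List.getElem?_take_of_lt hmc).symm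
      have : s[m]? = some k := by rw [h1, htake]; simp [hmc]
      simp [List.getD, this]
    · rw [if_neg (by omega)]
      set c := s.count k with hcdef
      have hsplit : s = List.replicate c k ++ s.drop c := by
        conv_lhs => rw [← List.take_append_drop c s]
        rw [htake]
      have hrec := ih (s.drop c) (m - c) (cum + (c : Int)) d
        (hs.sublist (List.drop_sublist c s))
        (List.pairwise_cons.mp hks).2
        (by
          intro k'
          constructor
          · intro hk'
            have hne : k' ≠ k := ne_of_gt ((List.pairwise_cons.mp hks).1 k' hk')
            have hk's : k' ∈ s := (hmem k').mp (List.mem_cons_of_mem _ hk')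
            rw [hsplit] at hk's
            rcases List.mem_append.mp hk's with h | h
            · exact absurd (List.eq_of_mem_replicate h) hne
            · exact h
          · intro hk'
            have hk's : k' ∈ s := by rw [hsplit]; exact List.mem_append.mpr (Or.inr hk')
            rcases List.mem_cons.mp ((hmem k').mpr hk's) with h | h
            · subst h; exact absurd hk' hdrop
            · exact h)
        (by
          intro k' hk'
          have hne : k' ≠ k := ne_of_gt ((List.pairwise_cons.mp hks).1 k' hk')
          have hcc : s.count k' = (s.drop c).count k' := by
            conv_lhs => rw [hsplit]
            rw [List.count_append, List.count_replicate]
            simp [Ne.symm hne]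
          rw [hcount k' (List.mem_cons_of_mem _ hk'), hcc])
        (by
          have : (s.drop c).length = s.length - c := List.length_drop
          omega)
      have harith : (m : Int) + cum = ((m - c : Nat) : Int) + (cum + (c : Int)) := by
        omega
      rw [harith, hrec]
      have hdg : (s.drop c)[m - c]? = s[m]? := by
        rw [List.getElem?_drop]
        congr 1
        omega
      simp [List.getD, hdg]

-- the two filtered flattened color lists coincide
theorem colors_eq (grid : List (List Int)) (ib : Bool) :
    (if ib then (grid.foldl (fun acc row => acc ++ row) []).filter (fun c => !(c == 0))
     else grid.foldl (fun acc row => acc ++ row) []) =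
    grid.flatMap (fun row => row.filter (fun c => !(ib && c == 0))) := by
  rw [foldl_append_flatten, List.nil_append]
  cases ib with
  | false => simp [List.flatMap_def]
  | true => simp [List.flatMap_def, List.filter_flatten]

-- ===== VERDICT (by name: the statement is the Claim_ definition above) =====
theorem get_median_color_spec : Claim_equal_get_median_color := by
  intro grid ib _
  unfold Spec_get_median_color get_median_color get_median_color_alt
  match grid with
  | [] => rfl
  | r0 :: rest =>
    simp only
    by_cases h0 : r0 = []
    · simp [h0]
    · rw [if_neg h0, if_neg h0]
      have hcol := colors_eq (r0 :: rest) ib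
      set cs := (r0 :: rest).flatMap (fun row => row.filter (fun c => !(ib && c == 0))) with hcs
      rw [hcol]
      by_cases hnil : cs = []
      · simp [hnil]
      · rw [if_neg hnil, if_neg hnil]
        -- identify the dict with the counter
        rw [PySem.Dict.foldl_insert_getD_add_one_eq_counter]
        set s := PySem.List.sorted cs (fun c => c) false with hsdef
        have hlen : s.length = cs.length := PySem.List.length_sorted cs (fun c => c) false
        have hpos : 0 < cs.length := List.length_pos_iff.mpr hnil
        set m : Nat := cs.length / 2 with hmdef
        have hmid : PySem.Int.floordiv ((cs.length : Int)) 2 = (m : Int) :=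
          PySem.Int.floordiv_natCast cs.length 2
        have hmlt : m < s.length := by rw [hlen]; omega
        -- A's side: pyGet? at a nonnegative in-range index
        have hA : (PySem.List.pyGet? s ((m : Int))).getD 0 = s.getD m 0 := by
          rw [PySem.List.pyGet?_natCast s m]
          have hv : s[m]? = some (s[m]'hmlt) := List.getElem?_eq_getElem hmlt
          simp [List.getD, hv]
        -- B's side: the scan
        have hperm : s.Perm cs := PySem.List.sorted_perm cs (fun c => c) false
        have hB : bScan (PySem.Dict.counter cs) ((m : Int) + 0)
            (PySem.List.sorted (PySem.Dict.counter cs).keys (fun k => k) false) 0 = s.getD m 0 := by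
          apply bScan_spec
          · simpa using PySem.List.sorted_pairwise (xs := cs) (key := fun c => c)
          · rw [PySem.Dict.keys_counter]
            exact PySem.List.sorted_ofList_pairwise_lt cs
          · intro k
            rw [PySem.Dict.keys_counter, PySem.List.mem_sorted, PySem.Set.mem_ofList]
            exact (hperm.mem_iff).symm
          · intro k _
            rw [PySem.Dict.getD_counter, hperm.count_eq]
          · exact hmlt
        rw [hmid, hA, ← hB]
        norm_num
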